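-- pv_equiv track=rewrite | github.com/zackzhang1999/slurm-bill-web | slurm_bill.py | _aggregate_job_states
-- ===== SOURCE A (Python) =====
-- from typing import List, Dict, Optional, Tuple
--
-- def _aggregate_job_states(states: List[str]) -> str:
--     """
--     根据所有作业步的状态确定主作业的最终状态
--
--     状态优先级（从高到低）：
--     RUNNING > PENDING > SUSPENDED > FAILED > TIMEOUT > CANCELLED > COMPLETED
--
--     特殊处理：
--     - 如果有任意作业步在运行，主作业为 RUNNING
--     - 如果有任意作业步失败，主作业为 FAILED
--     - 如果所有作业步都完成，主作业为 COMPLETED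
--     - 如果部分完成部分取消，标记为 PARTIAL
--     """
--     if not states:
--         return 'UNKNOWN'
--
--     # 状态优先级（数字越大优先级越高）
--     priority = {
--         'RUNNING': 100,
--         'R': 100,
--         'PENDING': 90,
--         'PD': 90,
--         'SUSPENDED': 80,
--         'S': 80,
--         'FAILED': 70,
--         'F': 70,
--         'TIMEOUT': 60,
--         'TO': 60,
--         'NODE_FAIL': 55,
--         'NF': 55,
--         'CANCELLED': 50,
--         'CA': 50,
--         'COMPLETED': 40,
--         'CD': 40,
--         'COMPLETING': 35,
--         'CG': 35,
--     }
--
--     # 检查是否有特殊状态（如 CANCELLED by xxx）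
--     has_cancelled = any('CANCELLED' in s for s in states)
--     cancelled_by = [s for s in states if 'CANCELLED by' in s]
--
--     # 如果有任意作业在运行，返回 RUNNING
--     if any(s in ['RUNNING', 'R'] for s in states):
--         return 'RUNNING'
--
--     # 如果有任意作业在等待，返回 PENDING
--     if any(s in ['PENDING', 'PD'] for s in states):
--         return 'PENDING'
--
--     # 如果有任意作业被暂停，返回 SUSPENDED
--     if any(s in ['SUSPENDED', 'S'] for s in states):
--         return 'SUSPENDED'
--
--     # 如果有任意作业失败，返回 FAILED
--     if any(s in ['FAILED', 'F'] for s in states):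
--         return 'FAILED'
--
--     # 如果有任意作业超时，返回 TIMEOUT
--     if any(s in ['TIMEOUT', 'TO'] for s in states):
--         return 'TIMEOUT'
--
--     # 如果有任意作业节点失败，返回 NODE_FAIL
--     if any(s in ['NODE_FAIL', 'NF'] for s in states):
--         return 'NODE_FAIL'
--
--     # 如果所有作业都完成了，返回 COMPLETED
--     if all(s in ['COMPLETED', 'CD', 'COMPLETING', 'CG'] for s in states):
--         return 'COMPLETED'
--
--     # 如果有取消的作业
--     if has_cancelled:
--         # 如果有部分完成部分取消，返回 PARTIAL
--         if any(s in ['COMPLETED', 'CD'] for s in states):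
--             return 'PARTIAL'
--         # 如果全部被取消，返回 CANCELLED（保留取消者信息）
--         if cancelled_by:
--             # 返回最常见的取消原因
--             from collections import Counter
--             most_common = Counter(cancelled_by).most_common(1)[0][0]
--             return most_common
--         return 'CANCELLED'
--
--     # 其他情况，返回优先级最高的状态
--     max_priority = -1
--     result_state = 'UNKNOWN'
--     for state in states:
--         base_state = state.split()[0]  # 处理 "CANCELLED by xxx" 这样的情况
--         p = priority.get(base_state, 0)
--         if p > max_priority:
--             max_priority = p
--             result_state = state
--
--     return result_state
-- ===== SOURCE B (Python) =====
-- from collections import Counter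
--
-- def _aggregate_job_states(states):
--     if not states:
--         return 'UNKNOWN'
--
--     priority = {
--         'RUNNING': 100, 'R': 100,
--         'PENDING': 90, 'PD': 90,
--         'SUSPENDED': 80, 'S': 80,
--         'FAILED': 70, 'F': 70,
--         'TIMEOUT': 60, 'TO': 60,
--         'NODE_FAIL': 55, 'NF': 55,
--         'CANCELLED': 50, 'CA': 50,
--         'COMPLETED': 40, 'CD': 40,
--         'COMPLETING': 35, 'CG': 35,
--     }
--
--     # one pass over states: set all flags, collect 'CANCELLED by' strings in
--     # order, and track the first highest-priority state (strict '>' = first wins)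
--     has_running = has_pending = has_suspended = False
--     has_failed = has_timeout = has_nodefail = False
--     has_cancelled = has_cd = False
--     all_completed = True
--     cancelled_by = []
--     best_p, best_state = -1, 'UNKNOWN'
--     for s in states:
--         if s in ('RUNNING', 'R'):
--             has_running = True
--         if s in ('PENDING', 'PD'):
--             has_pending = True
--         if s in ('SUSPENDED', 'S'):
--             has_suspended = True
--         if s in ('FAILED', 'F'):
--             has_failed = True
--         if s in ('TIMEOUT', 'TO'):
--             has_timeout = True
--         if s in ('NODE_FAIL', 'NF'):
--             has_nodefail = True
--         if s not in ('COMPLETED', 'CD', 'COMPLETING', 'CG'):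
--             all_completed = False
--         if 'CANCELLED' in s:
--             has_cancelled = True
--         if 'CANCELLED by' in s:
--             cancelled_by.append(s)
--         if s in ('COMPLETED', 'CD'):
--             has_cd = True
--         parts = s.split()
--         p = priority.get(parts[0], 0) if parts else 0
--         if p > best_p:
--             best_p, best_state = p, s
--
--     if has_running:
--         return 'RUNNING'
--     if has_pending:
--         return 'PENDING'
--     if has_suspended:
--         return 'SUSPENDED'
--     if has_failed:
--         return 'FAILED'
--     if has_timeout:
--         return 'TIMEOUT'
--     if has_nodefail:
--         return 'NODE_FAIL'
--     if all_completed: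
--         return 'COMPLETED'
--     if has_cancelled:
--         if has_cd:
--             return 'PARTIAL'
--         if cancelled_by:
--             counts = Counter(cancelled_by)
--             return max(counts, key=counts.get)  # first key with max count
--         return 'CANCELLED'
--     return best_state
-- ===== Notes on version B (the rewrite author's own statement) =====
-- stated objective: alternative
-- what changed: Replaces A's eight separate passes over states (seven any/all membership scans plus a final max-priority loop, each restarting the traversal) with a single pass that simultaneously sets all flags, collects the 'CANCELLED by' strings in order and tracks the first-wins highest-priority state, followed by the decision cascade on the collected flags; the Counter.most_common(1)[0][0] lookup becomes max(counts, key=counts.get).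
import Mathlib
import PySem

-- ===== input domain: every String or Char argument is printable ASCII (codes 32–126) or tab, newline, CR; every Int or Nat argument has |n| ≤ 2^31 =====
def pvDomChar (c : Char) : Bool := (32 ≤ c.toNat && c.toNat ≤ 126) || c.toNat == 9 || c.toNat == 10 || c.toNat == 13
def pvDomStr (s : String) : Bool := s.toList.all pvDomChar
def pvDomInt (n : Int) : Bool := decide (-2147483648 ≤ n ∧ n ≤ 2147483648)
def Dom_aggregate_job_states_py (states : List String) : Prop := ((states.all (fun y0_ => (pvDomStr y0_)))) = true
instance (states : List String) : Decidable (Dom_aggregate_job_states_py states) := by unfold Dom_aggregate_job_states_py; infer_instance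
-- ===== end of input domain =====

-- B replaces A's eight separate passes over `states` (seven any/all scans plus the
-- fallback max-priority loop) by ONE pass that collects all flags, the ordered
-- 'CANCELLED by' list and the first-wins highest-priority state, then runs the
-- decision cascade on the collected flags; objective: alternative decomposition.

-- shared state predicates / the priority table (used by both ports)
def pRun (s : String) : Bool := decide (s ∈ (["RUNNING", "R"] : List String))
def pPend (s : String) : Bool := decide (s ∈ (["PENDING", "PD"] : List String))
def pSusp (s : String) : Bool := decide (s ∈ (["SUSPENDED", "S"] : List String))
def pFail (s : String) : Bool := decide (s ∈ (["FAILED", "F"] : List String))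
def pTO (s : String) : Bool := decide (s ∈ (["TIMEOUT", "TO"] : List String))
def pNF (s : String) : Bool := decide (s ∈ (["NODE_FAIL", "NF"] : List String))
def pComp (s : String) : Bool := decide (s ∈ (["COMPLETED", "CD", "COMPLETING", "CG"] : List String))
def pCD (s : String) : Bool := decide (s ∈ (["COMPLETED", "CD"] : List String))
def pCanc (s : String) : Bool := PySem.Str.isIn "CANCELLED" s
def pCancBy (s : String) : Bool := PySem.Str.isIn "CANCELLED by" s
def prioDict : PySem.Dict String Int := PySem.Dict.ofList
  [("RUNNING", 100), ("R", 100), ("PENDING", 90), ("PD", 90),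
   ("SUSPENDED", 80), ("S", 80), ("FAILED", 70), ("F", 70),
   ("TIMEOUT", 60), ("TO", 60), ("NODE_FAIL", 55), ("NF", 55),
   ("CANCELLED", 50), ("CA", 50), ("COMPLETED", 40), ("CD", 40),
   ("COMPLETING", 35), ("CG", 35)]
def prio (w : String) : Int := prioDict.getD w 0

-- ===== PORT A =====
-- A's fallback loop does state.split()[0]; Pre_ guarantees the split has a first
-- word wherever the loop is reached, so pyGetD's default is never used.
def aggregate_job_states_py (states : List String) : String :=
  if states = [] then "UNKNOWN"
  else
    let has_cancelled := states.any pCanc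
    let cancelled_by := states.filter pCancBy
    if states.any pRun then "RUNNING"
    else if states.any pPend then "PENDING"
    else if states.any pSusp then "SUSPENDED"
    else if states.any pFail then "FAILED"
    else if states.any pTO then "TIMEOUT"
    else if states.any pNF then "NODE_FAIL"
    else if states.all pComp then "COMPLETED"
    else if has_cancelled then
      if states.any pCD then "PARTIAL"
      else if cancelled_by ≠ [] then
        -- Counter(cancelled_by).most_common(1)[0][0]
        (PySem.List.pyGetD
          (PySem.List.sorted (PySem.Dict.counter cancelled_by).items (fun p => p.2) true)
          0 ("", 0)).1
      else "CANCELLED"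
    else
      (states.foldl (fun (acc : Int × String) state =>
          let p := prio (PySem.List.pyGetD (PySem.Str.split₀ state) 0 "")
          if acc.1 < p then (p, state) else acc) (-1, "UNKNOWN")).2

-- ===== PORT B =====
structure JSAcc where
  hr : Bool
  hp : Bool
  hsu : Bool
  hf : Bool
  ht : Bool
  hnf : Bool
  ac : Bool
  hca : Bool
  cb : List String
  hcd : Bool
  best : Int × String
deriving Repr, DecidableEq

def bstepB (b : Int × String) (s : String) : Int × String :=
  let p := match PySem.Str.split₀ s with
           | [] => 0
           | w :: _ => prio w
  if b.1 < p then (p, s) else b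

def stepB (a : JSAcc) (s : String) : JSAcc :=
  { hr := a.hr || pRun s, hp := a.hp || pPend s, hsu := a.hsu || pSusp s,
    hf := a.hf || pFail s, ht := a.ht || pTO s, hnf := a.hnf || pNF s,
    ac := a.ac && pComp s, hca := a.hca || pCanc s,
    cb := if pCancBy s then a.cb ++ [s] else a.cb,
    hcd := a.hcd || pCD s,
    best := bstepB a.best s }

def aggregate_job_states_py_alt (states : List String) : String :=
  if states = [] then "UNKNOWN"
  else
    let r := states.foldl stepB
      { hr := false, hp := false, hsu := false, hf := false, ht := false,
        hnf := false, ac := true, hca := false, cb := [], hcd := false,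
        best := (-1, "UNKNOWN") }
    if r.hr then "RUNNING"
    else if r.hp then "PENDING"
    else if r.hsu then "SUSPENDED"
    else if r.hf then "FAILED"
    else if r.ht then "TIMEOUT"
    else if r.hnf then "NODE_FAIL"
    else if r.ac then "COMPLETED"
    else if r.hca then
      if r.hcd then "PARTIAL"
      else if r.cb ≠ [] then
        -- max(Counter(cancelled_by), key=counts.get): first key with maximal count
        (PySem.List.max? (PySem.Dict.counter r.cb).keys
          (fun k => (PySem.Dict.counter r.cb).getD k 0)).getD "UNKNOWN"
      else "CANCELLED"
    else r.best.2

-- ===== PRECONDITION & SPEC =====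
-- Pre_ excludes exactly the inputs on which A RAISES IndexError: a whitespace-only
-- state string (its .split() yields no words) reaching the fallback loop, i.e. when
-- no earlier branch of the cascade returns first.
def Pre_aggregate_job_states_py (states : List String) : Prop :=
  (states ≠ [] ∧ states.any pRun = false ∧ states.any pPend = false ∧
   states.any pSusp = false ∧ states.any pFail = false ∧ states.any pTO = false ∧
   states.any pNF = false ∧ states.all pComp = false ∧ states.any pCanc = false) →
  ∀ s ∈ states, PySem.Str.split₀ s ≠ []
instance (states : List String) : Decidable (Pre_aggregate_job_states_py states) := by
  unfold Pre_aggregate_job_states_py; infer_instance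
def pvWitness_aggregate_job_states_py : List String := ["COMPLETED", "CANCELLED by alice"]

def Spec_aggregate_job_states_py (states : List String) (out : String) : Prop := out = aggregate_job_states_py_alt states
instance (states : List String) (out : String) : Decidable (Spec_aggregate_job_states_py states out) := by unfold Spec_aggregate_job_states_py; infer_instance

-- ===== CLAIM (what is proved, stated in full; the proofs are below) =====
def Claim_equal_aggregate_job_states_py : Prop := ∀ (states : List String), Dom_aggregate_job_states_py states → Pre_aggregate_job_states_py states → Spec_aggregate_job_states_py states (aggregate_job_states_py states)
-- ===== LEMMAS AND PROOFS =====

-- the single pass computes exactly the seven scans, the filter and the best-fold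
theorem scan_spec (l : List String) (a : JSAcc) :
    l.foldl stepB a =
      { hr := a.hr || l.any pRun, hp := a.hp || l.any pPend,
        hsu := a.hsu || l.any pSusp, hf := a.hf || l.any pFail,
        ht := a.ht || l.any pTO, hnf := a.hnf || l.any pNF,
        ac := a.ac && l.all pComp, hca := a.hca || l.any pCanc,
        cb := a.cb ++ l.filter pCancBy, hcd := a.hcd || l.any pCD,
        best := l.foldl bstepB a.best } := by
  induction l generalizing a with
  | nil => simp
  | cons x t ih =>
    simp only [List.foldl_cons, ih, List.any_cons, List.all_cons, List.filter_cons]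
    cases h : pCancBy x <;>
      simp [stepB, h, Bool.or_assoc, Bool.and_assoc]

-- head of a reverse stable sort = Python max (first maximal element)
theorem head?_foldl_insertBy {α κ : Type} [LinearOrder κ] (key : α → κ) (l : List α) (acc : List α) :
    (l.foldl (fun acc x => PySem.List.insertBy (fun a b => decide (key b < key a)) x acc) acc).head? =
      l.foldl (fun (m : Option α) x =>
        match m with
        | none => some x
        | some m => if key m < key x then some x else some m) acc.head? := by
  induction l generalizing acc with
  | nil => rfl
  | cons x t ih =>
    simp only [List.foldl_cons, ih]
    congr 1
    cases acc with
    | nil => rfl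
    | cons y ys =>
      simp only [PySem.List.insertBy]
      split <;> simp_all

theorem head?_sorted_rev {α κ : Type} [LinearOrder κ] (l : List α) (key : α → κ) :
    (PySem.List.sorted l key true).head? = PySem.List.max? l key := by
  simp only [PySem.List.sorted, PySem.List.max?]
  exact head?_foldl_insertBy key l []

-- max? through a pairing map
theorem max?_cons_cons {α κ : Type} [LinearOrder κ] (key : α → κ) (a b : α) (l : List α) :
    PySem.List.max? (a :: b :: l) key =
      PySem.List.max? ((if key a < key b then b else a) :: l) key := by
  simp only [PySem.List.max?, List.foldl_cons]
  split <;> rfl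

theorem max?_map_pair {α κ : Type} [LinearOrder κ] (l : List α) (f : α → κ) :
    PySem.List.max? (l.map (fun k => (k, f k))) (fun p => p.2) =
      (PySem.List.max? l f).map (fun k => (k, f k)) := by
  cases l with
  | nil => rfl
  | cons x t =>
    induction t generalizing x with
    | nil => rfl
    | cons h t' ih =>
      rw [List.map_cons, List.map_cons, max?_cons_cons, max?_cons_cons f x h]
      have : (if ((x, f x).2 : κ) < (h, f h).2 then (h, f h) else (x, f x)) =
          ((fun k => (k, f k)) (if f x < f h then h else x)) := by
        split <;> simp_all
      rw [this]
      exact (List.map_cons ▸ ih (if f x < f h then h else x) : _)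

-- ===== VERDICT (by name: the statement is the Claim_ definition above) =====
set_option maxHeartbeats 1000000 in
theorem aggregate_job_states_py_spec : Claim_equal_aggregate_job_states_py := by
  intro states _ hpre
  unfold Spec_aggregate_job_states_py aggregate_job_states_py aggregate_job_states_py_alt
  by_cases hnil : states = []
  · simp [hnil]
  · simp only [if_neg hnil, scan_spec, Bool.false_or, Bool.true_and, List.nil_append]
    split_ifs with h1 h2 h3 h4 h5 h6 h7 h8 h9 h10 <;> try rfl
    · -- Counter branch: most_common(1)[0][0] = max(counts, key=counts.get)
      set cb := states.filter pCancBy with hcb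
      have hk : (fun k => (PySem.Dict.counter cb).getD k 0) =
          (fun k => (cb.count k : Int)) := by
        funext k; exact PySem.Dict.getD_counter cb k
      rw [hk, PySem.Dict.keys_counter, PySem.Dict.items_counter]
      have hne : PySem.Set.ofList cb ≠ [] := by
        intro hempty
        rcases List.exists_mem_of_ne_nil cb h10 with ⟨c, hc⟩
        have : c ∈ PySem.Set.ofList cb := (PySem.Set.mem_ofList cb c).mpr hc
        rw [hempty] at this
        exact absurd this (List.not_mem_nil)
      obtain ⟨m, hm⟩ : ∃ m, PySem.List.max? (PySem.Set.ofList cb)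
          (fun k => (cb.count k : Int)) = some m := by
        rcases hx : PySem.List.max? (PySem.Set.ofList cb)
            (fun k => (cb.count k : Int)) with _ | m
        · exact absurd (Iff.mp (PySem.List.max?_eq_none_iff _ _) hx) hne
        · exact ⟨m, rfl⟩
      rw [hm, Option.getD_some]
      have hhead : (PySem.List.sorted
          ((PySem.Set.ofList cb).map (fun k => (k, (cb.count k : Int))))
          (fun p => p.2) true).head? = some (m, (cb.count m : Int)) := by
        rw [head?_sorted_rev, max?_map_pair, hm, Option.map_some]
      cases hs : PySem.List.sorted
          ((PySem.Set.ofList cb).map (fun k => (k, (cb.count k : Int))))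
          (fun p => p.2) true with
      | nil => rw [hs] at hhead; exact absurd hhead (by simp)
      | cons p rest =>
        rw [hs] at hhead
        simp only [List.head?_cons, Option.some.injEq] at hhead
        rw [PySem.List.pyGetD_zero_cons, hhead]
    · -- fallback branch: the two best-folds agree since every split is non-empty
      have hsplit : ∀ s ∈ states, PySem.Str.split₀ s ≠ [] := by
        refine hpre ⟨hnil, ?_, ?_, ?_, ?_, ?_, ?_, ?_, ?_⟩ <;>
          simp only [Bool.not_eq_true] at h1 h2 h3 h4 h5 h6 h7 h8 <;> assumption
      have hfold : states.foldl (fun (acc : Int × String) state =>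
            let p := prio (PySem.List.pyGetD (PySem.Str.split₀ state) 0 "")
            if acc.1 < p then (p, state) else acc) (-1, "UNKNOWN") =
          states.foldl bstepB (-1, "UNKNOWN") := by
        refine PySem.List.foldl_congr_mem _ _ _ _ (fun acc x hx => ?_)
        have := hsplit x hx
        unfold bstepB
        cases hsx : PySem.Str.split₀ x with
        | nil => exact absurd hsx this
        | cons w ws => rw [PySem.List.pyGetD_zero_cons]
      rw [hfold]
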